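-- pv_equiv track=rewrite | github.com/CyberBridgeEU/cyberbridge | cti/service/app/services/scanner_results_service.py | _parse_zap_labels
-- ===== SOURCE A (Python) =====
-- def _parse_zap_labels(labels: list[str]) -> tuple[str, str]:
--     risk = ""
--     cwe = ""
--     for lbl in labels:
--         if lbl.startswith("zap-risk-"):
--             risk = lbl.replace("zap-risk-", "").capitalize()
--         elif lbl.startswith("zap-cwe-"):
--             cwe = lbl.replace("zap-cwe-", "")
--     return risk, cwe
-- ===== SOURCE B (Python) =====
-- def _parse_zap_labels(labels: list[str]) -> tuple[str, str]:
--     risks = [l.replace("zap-risk-", "").capitalize()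
--              for l in labels if l.startswith("zap-risk-")]
--     cwes = [l.replace("zap-cwe-", "")
--             for l in labels if l.startswith("zap-cwe-")]
--     return (risks[-1] if risks else "", cwes[-1] if cwes else "")
-- ===== Notes on version B (the rewrite author's own statement) =====
-- stated objective: alternative
-- what changed: Replaced the single interleaved stateful loop by two independent filter+map comprehensions (one per prefix) with a last-element-or-empty selection; last-wins semantics fall out of taking the last match.
import Mathlib
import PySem

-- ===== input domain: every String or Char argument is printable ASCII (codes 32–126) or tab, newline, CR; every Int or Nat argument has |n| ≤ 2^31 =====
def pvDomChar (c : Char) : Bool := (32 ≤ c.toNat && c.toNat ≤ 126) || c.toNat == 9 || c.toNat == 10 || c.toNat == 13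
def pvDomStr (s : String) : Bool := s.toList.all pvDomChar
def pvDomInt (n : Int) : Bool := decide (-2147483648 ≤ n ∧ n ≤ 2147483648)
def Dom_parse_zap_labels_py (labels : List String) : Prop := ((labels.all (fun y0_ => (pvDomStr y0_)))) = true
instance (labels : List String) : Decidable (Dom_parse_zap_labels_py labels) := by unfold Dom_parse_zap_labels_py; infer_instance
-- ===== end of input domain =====

-- B replaces A's single interleaved stateful loop by two independent filter+map passes
-- (one per prefix) with a last-element-or-empty selection (objective: alternative decomposition).


-- str.capitalize, ported by hand (PySem has no capitalize): first char uppercased, rest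
-- lowercased — exact on the ASCII domain (Python uses titlecase for the first char, which
-- coincides with uppercase on ASCII).
def pyCapitalize (s : String) : String :=
  match s.toList with
  | [] => ""
  | c :: cs => String.ofList (PySem.Chars.upperChar c :: cs.map PySem.Chars.lowerChar)

-- ===== PORT A =====
-- A's loop body: update (risk, cwe) from one label, branches in A's order.
def pvStepA (st : String × String) (lbl : String) : String × String :=
  if PySem.Str.startswith lbl "zap-risk-" then
    (pyCapitalize (PySem.Str.replace lbl "zap-risk-" ""), st.2)
  else if PySem.Str.startswith lbl "zap-cwe-" then
    (st.1, PySem.Str.replace lbl "zap-cwe-" "")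
  else st

def parse_zap_labels_py (labels : List String) : String × String :=
  labels.foldl pvStepA ("", "")

-- ===== PORT B =====
def parse_zap_labels_py_alt (labels : List String) : String × String :=
  let risks := (labels.filter (fun l => PySem.Str.startswith l "zap-risk-")).map
    (fun l => pyCapitalize (PySem.Str.replace l "zap-risk-" ""))
  let cwes := (labels.filter (fun l => PySem.Str.startswith l "zap-cwe-")).map
    (fun l => PySem.Str.replace l "zap-cwe-" "")
  (risks.getLastD "", cwes.getLastD "")

-- ===== PRECONDITION & SPEC =====
def Spec_parse_zap_labels_py (labels : List String) (out : String × String) : Prop := out = parse_zap_labels_py_alt labels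
instance (labels : List String) (out : String × String) : Decidable (Spec_parse_zap_labels_py labels out) := by unfold Spec_parse_zap_labels_py; infer_instance

-- ===== CLAIM (what is proved, stated in full; the proofs are below) =====
def Claim_equal_parse_zap_labels_py : Prop := ∀ (labels : List String), Dom_parse_zap_labels_py labels → Spec_parse_zap_labels_py labels (parse_zap_labels_py labels)

-- ===== LEMMAS AND PROOFS =====

-- No label starts with both prefixes: they differ at index 4 ('r' vs 'c').
theorem pv_not_both (l : String) (h : PySem.Str.startswith l "zap-risk-" = true) :
    PySem.Str.startswith l "zap-cwe-" = false := by
  by_contra hc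
  rw [Bool.not_eq_false] at hc
  rw [PySem.Str.startswith_eq, PySem.Chars.startswith_iff] at h hc
  rcases List.prefix_or_prefix_of_prefix h hc with h' | h' <;> revert h' <;> decide

-- Loop invariant: folding A's step from any accumulator yields, in each component,
-- the last mapped match of the corresponding filtered list, defaulting to the accumulator.
theorem pv_fold_eq (labels : List String) (risk cwe : String) :
    labels.foldl pvStepA (risk, cwe) =
      (((labels.filter (fun l => PySem.Str.startswith l "zap-risk-")).map
          (fun l => pyCapitalize (PySem.Str.replace l "zap-risk-" ""))).getLastD risk,
       ((labels.filter (fun l => PySem.Str.startswith l "zap-cwe-")).map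
          (fun l => PySem.Str.replace l "zap-cwe-" "")).getLastD cwe) := by
  induction labels generalizing risk cwe with
  | nil => simp
  | cons l rest ih =>
    by_cases hr : PySem.Str.startswith l "zap-risk-" = true
    · have hc := pv_not_both l hr
      simp only [List.foldl_cons, pvStepA, List.filter_cons, hr, hc,
        Bool.false_eq_true, if_false, if_true, List.map_cons, List.getLastD_cons, ih]
    · by_cases hc : PySem.Str.startswith l "zap-cwe-" = true
      · rw [Bool.not_eq_true] at hr
        simp only [List.foldl_cons, pvStepA, hr, hc, Bool.false_eq_true, if_false, if_true,
          List.filter_cons, List.map_cons, List.getLastD_cons, ih]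
      · rw [Bool.not_eq_true] at hr hc
        simp only [List.foldl_cons, pvStepA, hr, hc, Bool.false_eq_true, if_false,
          List.filter_cons, ih]

-- ===== VERDICT (by name: the statement is the Claim_ definition above) =====
theorem parse_zap_labels_py_spec : Claim_equal_parse_zap_labels_py := by
  intro labels _
  unfold Spec_parse_zap_labels_py parse_zap_labels_py parse_zap_labels_py_alt
  exact pv_fold_eq labels "" ""
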